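-- pv_equiv track=rewrite | github.com/TKTINC/ai-qa-agent | src/agent/planning/goal_manager.py | _determine_priority_from_text
-- ===== SOURCE A (Python) =====
-- def _determine_priority_from_text(text: str) -> int:
--     """
--     Determine goal priority based on text content
--     """
--     text_lower = text.lower()
--
--     # High priority indicators
--     if any(word in text_lower for word in ["urgent", "critical", "asap", "immediately", "emergency"]):
--         return 1
--
--     # Medium-high priority indicators
--     if any(word in text_lower for word in ["important", "soon", "quickly", "priority"]):
--         return 2
--
--     # Low priority indicators
--     if any(word in text_lower for word in ["when possible", "eventually", "sometime", "optional"]):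
--         return 4
--
--     # Default to medium priority
--     return 3
-- ===== SOURCE B (Python) =====
-- # B: one keyword->priority dict scanned once, collecting matched priorities; min of matches, 3 when none.
-- _KEYWORD_PRIORITY = {
--     "urgent": 1, "critical": 1, "asap": 1, "immediately": 1, "emergency": 1,
--     "important": 2, "soon": 2, "quickly": 2, "priority": 2,
--     "when possible": 4, "eventually": 4, "sometime": 4, "optional": 4,
-- }
--
-- def _determine_priority_from_text(text: str) -> int:
--     text_lower = text.lower()
--     matched = [p for w, p in _KEYWORD_PRIORITY.items() if w in text_lower]
--     return min(matched) if matched else 3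
-- ===== Notes on version B (the rewrite author's own statement) =====
-- stated objective: idiomatic
-- what changed: Replaces the three ordered any()-guard branches by a single keyword->priority dict scanned once, returning the minimum of the matched priorities (3 when nothing matches); correct because tier precedence 1<2<4 equals numeric order.
import Mathlib
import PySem

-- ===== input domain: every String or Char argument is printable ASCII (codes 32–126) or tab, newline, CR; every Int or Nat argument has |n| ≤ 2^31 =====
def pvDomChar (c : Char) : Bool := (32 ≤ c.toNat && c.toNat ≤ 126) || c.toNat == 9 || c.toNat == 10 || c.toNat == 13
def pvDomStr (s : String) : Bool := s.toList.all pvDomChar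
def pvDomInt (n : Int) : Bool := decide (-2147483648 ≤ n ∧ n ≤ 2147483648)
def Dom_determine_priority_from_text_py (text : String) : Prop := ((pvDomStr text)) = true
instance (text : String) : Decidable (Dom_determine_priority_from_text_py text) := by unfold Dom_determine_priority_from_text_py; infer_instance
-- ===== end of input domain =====

-- B replaces A's three ordered any()-guards by one keyword->priority map scanned once, taking the min of the matched priorities (idiomatic).

-- ===== PORT A =====
def determine_priority_from_text_py (text : String) : Int :=
  let text_lower := PySem.Str.lower text
  if ["urgent", "critical", "asap", "immediately", "emergency"].any
      (fun word => PySem.Str.isIn word text_lower) then 1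
  else if ["important", "soon", "quickly", "priority"].any
      (fun word => PySem.Str.isIn word text_lower) then 2
  else if ["when possible", "eventually", "sometime", "optional"].any
      (fun word => PySem.Str.isIn word text_lower) then 4
  else 3

-- ===== PORT B =====
def pvKeywordPriority : List (String × Int) :=
  [("urgent", 1), ("critical", 1), ("asap", 1), ("immediately", 1), ("emergency", 1),
   ("important", 2), ("soon", 2), ("quickly", 2), ("priority", 2),
   ("when possible", 4), ("eventually", 4), ("sometime", 4), ("optional", 4)]

def determine_priority_from_text_py_alt (text : String) : Int :=
  let text_lower := PySem.Str.lower text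
  let matched := (pvKeywordPriority.filter (fun wp => PySem.Str.isIn wp.1 text_lower)).map
    (fun wp => wp.2)
  match PySem.List.min? matched (fun x => x) with
  | some m => m
  | none => 3

-- ===== PRECONDITION & SPEC =====
def Spec_determine_priority_from_text_py (text : String) (out : Int) : Prop := out = determine_priority_from_text_py_alt text
instance (text : String) (out : Int) : Decidable (Spec_determine_priority_from_text_py text out) := by unfold Spec_determine_priority_from_text_py; infer_instance

-- ===== CLAIM (what is proved, stated in full; the proofs are below) =====
def Claim_equal_determine_priority_from_text_py : Prop := ∀ (text : String), Dom_determine_priority_from_text_py text → Spec_determine_priority_from_text_py text (determine_priority_from_text_py text)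

-- ===== LEMMAS AND PROOFS =====

-- the matched-priority list of B, with the substring test abstracted
def pvMatched (f : String → Bool) : List Int :=
  (pvKeywordPriority.filter (fun wp => f wp.1)).map (fun wp => wp.2)

theorem pvMem1 (f : String → Bool) : (1:Int) ∈ pvMatched f ↔
    (f "urgent" = true ∨ f "critical" = true ∨ f "asap" = true ∨
     f "immediately" = true ∨ f "emergency" = true) := by
  simp [pvMatched, pvKeywordPriority, List.mem_filter]

theorem pvMem2 (f : String → Bool) : (2:Int) ∈ pvMatched f ↔
    (f "important" = true ∨ f "soon" = true ∨ f "quickly" = true ∨ f "priority" = true) := by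
  simp [pvMatched, pvKeywordPriority, List.mem_filter]

theorem pvMem4 (f : String → Bool) : (4:Int) ∈ pvMatched f ↔
    (f "when possible" = true ∨ f "eventually" = true ∨ f "sometime" = true ∨
     f "optional" = true) := by
  simp [pvMatched, pvKeywordPriority, List.mem_filter]

theorem pvMemAll (f : String → Bool) : ∀ x ∈ pvMatched f, x = 1 ∨ x = 2 ∨ x = 4 := by
  intro x hx
  simp [pvMatched, pvKeywordPriority, List.mem_filter] at hx
  tauto

-- B's result when some priority p is matched and nothing smaller is
theorem pvMinPick (f : String → Bool) (p : Int) (hp : p ∈ pvMatched f)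
    (hmin : ∀ x ∈ pvMatched f, p ≤ x) :
    (match PySem.List.min? (pvMatched f) (fun x => x) with
     | some m => m | none => 3) = p := by
  rcases h : PySem.List.min? (pvMatched f) (fun x => x) with _ | m
  · rw [PySem.List.min?_eq_none_iff] at h
    simp [h] at hp
  · have hmem : m ∈ pvMatched f := PySem.List.min?_mem h
    have h1 : m ≤ p := PySem.List.min?_isMin h p hp
    have h2 : p ≤ m := hmin m hmem
    simpa using le_antisymm h1 h2

-- ===== VERDICT (by name: the statement is the Claim_ definition above) =====
theorem determine_priority_from_text_py_spec : Claim_equal_determine_priority_from_text_py := by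
  intro text _
  unfold Spec_determine_priority_from_text_py determine_priority_from_text_py determine_priority_from_text_py_alt
  set f : String → Bool := fun w => PySem.Str.isIn w (PySem.Str.lower text) with hf
  show (if _ then _ else _) = (match PySem.List.min? (pvMatched f) (fun x => x) with
    | some m => m | none => 3)
  by_cases h1 : (f "urgent" = true ∨ f "critical" = true ∨ f "asap" = true ∨
      f "immediately" = true ∨ f "emergency" = true)
  · rw [if_pos (by simp only [List.any_cons, List.any_nil, Bool.or_eq_true, Bool.or_false]; exact h1)]
    refine (pvMinPick f 1 ((pvMem1 f).mpr h1) ?_).symm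
    intro x hx; rcases pvMemAll f x hx with h|h|h <;> omega
  · rw [if_neg (by simp only [List.any_cons, List.any_nil, Bool.or_eq_true, Bool.or_false]; exact h1)]
    by_cases h2 : (f "important" = true ∨ f "soon" = true ∨ f "quickly" = true ∨
        f "priority" = true)
    · rw [if_pos (by simp only [List.any_cons, List.any_nil, Bool.or_eq_true, Bool.or_false]; exact h2)]
      refine (pvMinPick f 2 ((pvMem2 f).mpr h2) ?_).symm
      intro x hx
      rcases pvMemAll f x hx with h|h|h
      · rw [h] at hx; exact absurd ((pvMem1 f).mp hx) h1
      all_goals omega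
    · rw [if_neg (by simp only [List.any_cons, List.any_nil, Bool.or_eq_true, Bool.or_false]; exact h2)]
      by_cases h3 : (f "when possible" = true ∨ f "eventually" = true ∨
          f "sometime" = true ∨ f "optional" = true)
      · rw [if_pos (by simp only [List.any_cons, List.any_nil, Bool.or_eq_true, Bool.or_false]; exact h3)]
        refine (pvMinPick f 4 ((pvMem4 f).mpr h3) ?_).symm
        intro x hx
        rcases pvMemAll f x hx with h|h|h
        · rw [h] at hx; exact absurd ((pvMem1 f).mp hx) h1
        · rw [h] at hx; exact absurd ((pvMem2 f).mp hx) h2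
        · omega
      · rw [if_neg (by simp only [List.any_cons, List.any_nil, Bool.or_eq_true, Bool.or_false]; exact h3)]
        have hnil : pvMatched f = [] := by
          rcases hne : pvMatched f with _ | ⟨x, xs⟩
          · rfl
          · exfalso
            have hx : x ∈ pvMatched f := by rw [hne]; exact List.mem_cons_self ..
            rcases pvMemAll f x hx with h|h|h
            · rw [h] at hx; exact h1 ((pvMem1 f).mp hx)
            · rw [h] at hx; exact h2 ((pvMem2 f).mp hx)
            · rw [h] at hx; exact h3 ((pvMem4 f).mp hx)
        rw [hnil]
        rfl
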